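-- pv_equiv track=rewrite | github.com/Iris-YangY/Python | Recursion.py | count_appearances
-- ===== SOURCE A (Python) =====
-- def count_appearances(lst, low, high, val):
--     if(low==high):
--         if(lst[low]==val):
--             return 1
--         else:
--             return 0
--     else:
--         rest_count=count_appearances(lst, low+1, high, val)
--         if(lst[low]==val):
--             return 1+rest_count
--         else:
--             return rest_count
-- ===== SOURCE B (Python) =====
-- def count_appearances(lst, low, high, val):
--     count = 0
--     i = low
--     while True:
--         if lst[i] == val:
--             count += 1
--         if i == high:
--             return count
--         i += 1
-- ===== Notes on version B (the rewrite author's own statement) =====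
-- stated objective: alternative
-- what changed: Replaces A's non-tail recursion (which sums 1+rest back up the call stack) with an iterative forward scan that accumulates the count in a local variable, using no call stack.
import Mathlib
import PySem

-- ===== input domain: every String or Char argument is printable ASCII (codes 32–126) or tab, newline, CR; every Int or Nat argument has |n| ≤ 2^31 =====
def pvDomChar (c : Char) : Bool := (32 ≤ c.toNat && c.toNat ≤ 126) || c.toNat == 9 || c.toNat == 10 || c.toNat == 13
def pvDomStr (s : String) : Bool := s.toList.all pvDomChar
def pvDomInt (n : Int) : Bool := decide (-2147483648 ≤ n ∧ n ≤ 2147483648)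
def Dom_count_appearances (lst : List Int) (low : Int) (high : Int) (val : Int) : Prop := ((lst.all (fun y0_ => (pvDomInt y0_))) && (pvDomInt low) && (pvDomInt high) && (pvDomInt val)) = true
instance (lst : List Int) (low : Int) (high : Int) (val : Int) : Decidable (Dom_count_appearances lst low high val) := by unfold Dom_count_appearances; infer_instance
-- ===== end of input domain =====

-- B replaces A's non-tail recursion with an iterative while-loop scan accumulating the count; same linear cost, no call stack.


-- ===== PORT A =====
-- Literal port of A's recursion. lst[low] is pyGet?; where Python would raise
-- (index out of range, or the non-terminating descent when low > high) the port
-- is outside Pre_ and the totality guard returns junk (0).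
def count_appearances (lst : List Int) (low : Int) (high : Int) (val : Int) : Int :=
  if low = high then
    if PySem.List.pyGet? lst low = some val then 1 else 0
  else if _h : low < high then
    let rest_count := count_appearances lst (low + 1) high val
    if PySem.List.pyGet? lst low = some val then 1 + rest_count else rest_count
  else 0
termination_by (high - low).toNat
decreasing_by omega

-- ===== PORT B =====
-- The while-True loop of Source B: test lst[i]==val, bump count, return at i == high, else i += 1.
-- Where Python would raise (lst[i] out of range, or the unbounded walk when i starts above high)
-- the port is outside Pre_ and the totality guard returns junk (0).
def countLoop (lst : List Int) (val : Int) (high : Int) (count : Int) (i : Int) : Int :=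
  let count' := if PySem.List.pyGet? lst i = some val then count + 1 else count
  if i = high then count'
  else if _h : i < high then countLoop lst val high count' (i + 1)
  else 0
termination_by (high - i).toNat
decreasing_by omega

def count_appearances_alt (lst : List Int) (low : Int) (high : Int) (val : Int) : Int :=
  countLoop lst val high 0 low

-- ===== PRECONDITION & SPEC =====
-- Exactly the inputs on which Python A returns: every visited index low..high is a
-- valid Python index (negative indices wrap) and the recursion reaches its base case.
def Pre_count_appearances (lst : List Int) (low : Int) (high : Int) (val : Int) : Prop :=
  low ≤ high ∧ -(lst.length : Int) ≤ low ∧ high < (lst.length : Int)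
instance (lst : List Int) (low : Int) (high : Int) (val : Int) : Decidable (Pre_count_appearances lst low high val) := by unfold Pre_count_appearances; infer_instance

def pvWitness_count_appearances : List Int × Int × Int × Int := ([1, 2, 1], 0, 2, 1)

def Spec_count_appearances (lst : List Int) (low : Int) (high : Int) (val : Int) (out : Int) : Prop := out = count_appearances_alt lst low high val
instance (lst : List Int) (low : Int) (high : Int) (val : Int) (out : Int) : Decidable (Spec_count_appearances lst low high val out) := by unfold Spec_count_appearances; infer_instance

-- ===== CLAIM (what is proved, stated in full; the proofs are below) =====
def Claim_equal_count_appearances : Prop := ∀ (lst : List Int) (low : Int) (high : Int) (val : Int), Dom_count_appearances lst low high val → Pre_count_appearances lst low high val → Spec_count_appearances lst low high val (count_appearances lst low high val)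

-- ===== LEMMAS AND PROOFS =====

-- Both sides equal the count of matching indices in [low, high].
def rangeCount (lst : List Int) (low : Int) (high : Int) (val : Int) : Int :=
  ((PySem.List.pyRange low (high + 1) 1).countP
    (fun i => decide (PySem.List.pyGet? lst i = some val)) : Int)

lemma a_eq_rangeCount (lst : List Int) (val high : Int) :
    ∀ n : Nat, ∀ low : Int, (high - low).toNat = n → low ≤ high →
      count_appearances lst low high val = rangeCount lst low high val := by
  intro n
  induction n with
  | zero =>
    intro low hn hle
    have heq : low = high := by omega
    subst heq
    unfold rangeCount
    rw [PySem.List.pyRange_one_cons (by omega),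
        PySem.List.pyRange_one_eq_nil (by omega)]
    unfold count_appearances
    simp only [List.countP_cons, List.countP_nil]
    split <;> simp_all
  | succ k ih =>
    intro low hn hle
    have hlt : low < high := by omega
    have hrec := ih (low + 1) (by omega) (by omega)
    unfold rangeCount at hrec ⊢
    rw [PySem.List.pyRange_one_cons (by omega)]
    unfold count_appearances
    rw [if_neg (by omega), dif_pos hlt]
    simp only [List.countP_cons, hrec]
    split <;> rename_i h <;> simp only [h, decide_true, decide_false] <;> push_cast <;> omega

lemma countLoop_eq_rangeCount (lst : List Int) (val high : Int) :
    ∀ n : Nat, ∀ i c : Int, (high - i).toNat = n → i ≤ high →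
      countLoop lst val high c i = c + rangeCount lst i high val := by
  intro n
  induction n with
  | zero =>
    intro i c hn hle
    have heq : i = high := by omega
    subst heq
    unfold countLoop rangeCount
    rw [PySem.List.pyRange_one_cons (by omega),
        PySem.List.pyRange_one_eq_nil (by omega)]
    by_cases h : PySem.List.pyGet? lst i = some val <;> simp [h]
  | succ k ih =>
    intro i c hn hle
    have hlt : i < high := by omega
    unfold countLoop rangeCount
    rw [if_neg (by omega), dif_pos hlt,
        ih (i + 1) _ (by omega) (by omega),
        PySem.List.pyRange_one_cons (by omega)]
    unfold rangeCount
    simp only [List.countP_cons]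
    split <;> rename_i h <;> simp only [h, decide_true, decide_false] <;> push_cast <;> omega

-- ===== VERDICT (by name: the statement is the Claim_ definition above) =====
theorem count_appearances_spec : Claim_equal_count_appearances := by
  intro lst low high val _ hpre
  unfold Spec_count_appearances
  unfold count_appearances_alt
  rw [a_eq_rangeCount lst val high (high - low).toNat low rfl hpre.1,
      countLoop_eq_rangeCount lst val high (high - low).toNat low 0 rfl hpre.1]
  omega
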